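-- pv_equiv track=rewrite | github.com/dinomadsaur-jl/Projects | pywa/pywa_v1p0.py | _is_html
-- ===== SOURCE A (Python) =====
-- def _is_html(text):
--     """Check if text contains HTML."""
--     if not text:
--         return False
--     html_patterns = [
--         '<html', '<!DOCTYPE', '<body', '<head', '<div',
--         '<script', '<svg', '<canvas', '<style', '<table',
--         'Plotly', 'chart', 'dashboard'
--     ]
--     text_lower = text.lower()
--     for pattern in html_patterns:
--         if pattern.lower() in text_lower:
--             return True
--     return False
-- ===== SOURCE B (Python) =====
-- def _is_html(text):
--     """Check if text contains HTML."""
--     if not text: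
--         return False
--     patterns = [
--         '<html', '<!doctype', '<body', '<head', '<div',
--         '<script', '<svg', '<canvas', '<style', '<table',
--         'plotly', 'chart', 'dashboard'
--     ]
--     n = len(text)
--     for i in range(n):
--         c = text[i].lower()
--         for p in patterns:
--             if c == p[0] and text[i:i + len(p)].lower() == p:
--                 return True
--     return False
-- ===== Notes on version B (the rewrite author's own statement) =====
-- stated objective: alternative
-- what changed: B makes a single left-to-right scan over the text, lowering one character per position and testing there (first-char guard, then a case-insensitive match) against pre-lowercased markers, instead of A's lowering the whole text and running 13 independent substring searches over it.
import Mathlib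
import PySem

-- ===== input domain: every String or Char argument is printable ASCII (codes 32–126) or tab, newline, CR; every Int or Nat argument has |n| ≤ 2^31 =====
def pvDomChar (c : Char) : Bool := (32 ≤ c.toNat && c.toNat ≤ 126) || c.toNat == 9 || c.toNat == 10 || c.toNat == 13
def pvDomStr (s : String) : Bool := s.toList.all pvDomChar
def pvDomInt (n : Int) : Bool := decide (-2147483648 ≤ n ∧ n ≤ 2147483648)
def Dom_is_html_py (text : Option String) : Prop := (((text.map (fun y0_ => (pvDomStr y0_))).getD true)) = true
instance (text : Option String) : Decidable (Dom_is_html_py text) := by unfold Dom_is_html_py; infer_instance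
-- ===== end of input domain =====

-- B replaces A's 13 independent substring searches over the lowered text by one
-- left-to-right scan testing each position against the pre-lowered markers (alternative decomposition, same cost class).


-- ===== PORT A =====
def htmlPatternsA : List String :=
  ["<html", "<!DOCTYPE", "<body", "<head", "<div",
   "<script", "<svg", "<canvas", "<style", "<table",
   "Plotly", "chart", "dashboard"]

-- the `for pattern in html_patterns: if pattern.lower() in text_lower: return True` loop
def aLoop (textLower : String) : List String → Bool
  | [] => false
  | p :: ps => if PySem.Str.isIn (PySem.Str.lower p) textLower then true else aLoop textLower ps

def is_html_py (text : Option String) : Bool :=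
  match text with
  | none => false
  | some s => if s.toList.isEmpty then false else aLoop (PySem.Str.lower s) htmlPatternsA

-- ===== PORT B =====
def htmlPatternsB : List (List Char) :=
  ["<html".toList, "<!doctype".toList, "<body".toList, "<head".toList, "<div".toList,
   "<script".toList, "<svg".toList, "<canvas".toList, "<style".toList, "<table".toList,
   "plotly".toList, "chart".toList, "dashboard".toList]

-- `c == p[0] and text[i:i + len(p)].lower() == p` at the suffix starting at i (text[i:i+len(p)] = take len(p) of it)
def matchAtCI (cl : Char) (p : List Char) (cs : List Char) : Bool :=
  (PySem.List.pyGet? p 0 == some cl) && (PySem.Chars.lower (List.take p.length cs) == p)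

-- `for i in range(n): c = text[i].lower(); for p in patterns: …` as a scan over nonempty suffixes
def scanB : List Char → Bool
  | [] => false
  | c :: cs =>
    let cl := PySem.Chars.lowerChar c
    htmlPatternsB.any (fun p => matchAtCI cl p (c :: cs)) || scanB cs

def is_html_py_alt (text : Option String) : Bool :=
  match text with
  | none => false
  | some s => if s.toList.isEmpty then false else scanB s.toList

-- ===== PRECONDITION & SPEC =====
def Spec_is_html_py (text : Option String) (out : Bool) : Prop := out = is_html_py_alt text
instance (text : Option String) (out : Bool) : Decidable (Spec_is_html_py text out) := by unfold Spec_is_html_py; infer_instance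

-- ===== CLAIM (what is proved, stated in full; the proofs are below) =====
def Claim_equal_is_html_py : Prop := ∀ (text : Option String), Dom_is_html_py text → Spec_is_html_py text (is_html_py text)

-- ===== LEMMAS AND PROOFS =====

theorem matchAtCI_eq (p : List Char) (hp : p ≠ []) (c : Char) (cs : List Char) :
    matchAtCI (PySem.Chars.lowerChar c) p (c :: cs) = decide (p <+: PySem.Chars.lower (c :: cs)) := by
  obtain ⟨q, qs, rfl⟩ := List.exists_cons_of_ne_nil hp
  rw [Bool.eq_iff_iff]
  simp [matchAtCI, PySem.List.pyGet?, PySem.List.pyIdx?, PySem.Chars.lower,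
    List.map_take, List.prefix_iff_eq_take]
  intro h; subst h
  constructor
  · rintro ⟨-, h2⟩; exact h2.symm
  · intro h2; exact ⟨rfl, h2.symm⟩

theorem aLoop_eq_any (tl : String) (ps : List String) :
    aLoop tl ps = ps.any (fun p => PySem.Str.isIn (PySem.Str.lower p) tl) := by
  induction ps with
  | nil => rfl
  | cons p ps ih =>
    simp only [aLoop, ih, List.any_cons]
    split_ifs with h
    · rw [h, Bool.true_or]
    · rw [Bool.not_eq_true] at h; rw [h, Bool.false_or]

theorem patternsB_ne_nil : ∀ p ∈ htmlPatternsB, p ≠ [] := by decide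

theorem scanB_eq (cs : List Char) :
    scanB cs = true ↔ ∃ p ∈ htmlPatternsB, ∃ j, p <+: (PySem.Chars.lower cs).drop j := by
  induction cs with
  | nil =>
    simp only [scanB, PySem.Chars.lower, List.map_nil, List.drop_nil, List.prefix_nil]
    constructor
    · intro h; cases h
    · rintro ⟨p, hp, _, rfl⟩; revert hp; decide
  | cons c cs ih =>
    have hmatch : ∀ p ∈ htmlPatternsB,
        matchAtCI (PySem.Chars.lowerChar c) p (c :: cs) = decide (p <+: PySem.Chars.lower (c :: cs)) :=
      fun p hp => matchAtCI_eq p (patternsB_ne_nil p hp) c cs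
    simp only [scanB, Bool.or_eq_true, List.any_eq_true, ih]
    constructor
    · rintro (⟨p, hp, hpre⟩ | ⟨p, hp, j, hpre⟩)
      · rw [hmatch p hp, decide_eq_true_eq] at hpre
        exact ⟨p, hp, 0, by simpa using hpre⟩
      · exact ⟨p, hp, j + 1, by simpa [PySem.Chars.lower] using hpre⟩
    · rintro ⟨p, hp, j, hpre⟩
      cases j with
      | zero =>
        exact Or.inl ⟨p, hp, by rw [hmatch p hp, decide_eq_true_eq]; simpa using hpre⟩
      | succ j => exact Or.inr ⟨p, hp, j, by simpa [PySem.Chars.lower] using hpre⟩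

theorem patterns_lower :
    htmlPatternsA.map (fun p => PySem.Chars.lower p.toList) = htmlPatternsB := by decide

theorem is_html_py_spec : Claim_equal_is_html_py := by
  intro text _
  unfold Spec_is_html_py
  match text with
  | none => rfl
  | some s =>
    simp only [is_html_py, is_html_py_alt]
    split_ifs with h
    · rfl
    · rw [aLoop_eq_any]
      rw [Bool.eq_iff_iff, List.any_eq_true, scanB_eq]
      constructor
      · rintro ⟨p, hp, hin⟩
        rw [PySem.Str.isIn_iff_infix, PySem.Str.toList_lower, PySem.Str.toList_lower,
          ← PySem.Chars.isIn_iff_infix, ← PySem.Chars.exists_prefix_drop_iff_isIn] at hin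
        obtain ⟨j, hj⟩ := hin
        exact ⟨PySem.Chars.lower p.toList,
          by rw [← patterns_lower]; exact List.mem_map_of_mem hp, j, hj⟩
      · rintro ⟨q, hq, j, hj⟩
        rw [← patterns_lower, List.mem_map] at hq
        obtain ⟨p, hp, rfl⟩ := hq
        refine ⟨p, hp, ?_⟩
        rw [PySem.Str.isIn_iff_infix, PySem.Str.toList_lower, PySem.Str.toList_lower,
          ← PySem.Chars.isIn_iff_infix, ← PySem.Chars.exists_prefix_drop_iff_isIn]
        exact ⟨j, hj⟩
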